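-- pv_equiv track=rewrite | github.com/CamoGuy3000/CryptographicallySecureBank | src/cryptography/sha.py | my_sha1
-- ===== SOURCE A (Python) =====
-- def my_sha1(data) -> str:
--   # Ensure data is in bytes
--   if type(data) == str:
--     data = data.encode('utf-8')  # encode string to bytes
--
--   # Initial hash values:
--   h0 = 0x67452301
--   h1 = 0xEFCDAB89
--   h2 = 0x98BADCFE
--   h3 = 0x10325476
--   h4 = 0xC3D2E1F0
--
--   # Padding:
--   original_byte_len = len(data)
--   original_bit_len = original_byte_len * 8
--   data += b'\x80' + b'\x00' * ((56 - (original_byte_len + 1) % 64) % 64)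
--   data += original_bit_len.to_bytes(8, 'big')
--
--   def chunks(l, n):
--     return [l[i:i+n] for i in range(0, len(l), n)]
--
--   def rol(n, b):
--     return ((n << b) | (n >> (32 - b))) & 0xffffffff
--
--   # Process each 512-bit chunk
--   for chunk in chunks(data, 64):
--     w = [0] * 80
--     # Break chunk into sixteen 32-bit big-endian words
--     w[0:16] = [int.from_bytes(chunk[i:i+4], 'big') for i in range(0, 64, 4)]
--
--     # Extend the sixteen 32-bit words into eighty 32-bit words
--     for i in range(16, 80):
--         w[i] = rol((w[i-3] ^ w[i-8] ^ w[i-14] ^ w[i-16]), 1)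
--
--     a, b, c, d, e = h0, h1, h2, h3, h4
--
--     for i in range(80):
--       if 0 <= i < 20:
--         f = d ^ (b & (c ^ d))
--         k = 0x5A827999
--       elif 20 <= i < 40:
--         f = b ^ c ^ d
--         k = 0x6ED9EBA1
--       elif 40 <= i < 60:
--         f = (b & c) | (d & (b | c))
--         k = 0x8F1BBCDC
--       elif 60 <= i < 80:
--         f = b ^ c ^ d
--         k = 0xCA62C1D6
--
--       temp = rol(a, 5) + f + e + k + w[i] & 0xffffffff
--       e = d
--       d = c
--       c = rol(b, 30)
--       b = a
--       a = temp
--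
--     h0 = (h0 + a) & 0xffffffff
--     h1 = (h1 + b) & 0xffffffff
--     h2 = (h2 + c) & 0xffffffff
--     h3 = (h3 + d) & 0xffffffff
--     h4 = (h4 + e) & 0xffffffff
--
--   return '%08x%08x%08x%08x%08x' % (h0, h1, h2, h3, h4)
-- ===== SOURCE B (Python) =====
-- def my_sha1(data) -> str:
--   # Same digest, different block processing: the 80-word message schedule is fused
--   # into the compression loop using a 16-word rolling buffer updated in place.
--   if type(data) == str:
--     data = data.encode('utf-8')
--
--   h0 = 0x67452301
--   h1 = 0xEFCDAB89
--   h2 = 0x98BADCFE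
--   h3 = 0x10325476
--   h4 = 0xC3D2E1F0
--
--   bit_len = len(data) * 8
--   msg = data + b'\x80' + b'\x00' * ((-(len(data) + 9)) % 64) + bit_len.to_bytes(8, 'big')
--
--   def rol(n, b):
--     return ((n << b) | (n >> (32 - b))) & 0xffffffff
--
--   for off in range(0, len(msg), 64):
--     w = [int.from_bytes(msg[off + 4 * j: off + 4 * j + 4], 'big') for j in range(16)]
--     a, b, c, d, e = h0, h1, h2, h3, h4
--     for i in range(80):
--       if i >= 16:
--         w[i % 16] = rol(w[(i - 3) % 16] ^ w[(i - 8) % 16] ^ w[(i - 14) % 16] ^ w[(i - 16) % 16], 1)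
--       wi = w[i % 16]
--       if i < 20:
--         f, k = d ^ (b & (c ^ d)), 0x5A827999
--       elif i < 40:
--         f, k = b ^ c ^ d, 0x6ED9EBA1
--       elif i < 60:
--         f, k = (b & c) | (d & (b | c)), 0x8F1BBCDC
--       else:
--         f, k = b ^ c ^ d, 0xCA62C1D6
--       a, b, c, d, e = (rol(a, 5) + f + e + k + wi) & 0xffffffff, a, rol(b, 30), c, d
--     h0 = (h0 + a) & 0xffffffff
--     h1 = (h1 + b) & 0xffffffff
--     h2 = (h2 + c) & 0xffffffff
--     h3 = (h3 + d) & 0xffffffff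
--     h4 = (h4 + e) & 0xffffffff
--
--   return ''.join('%08x' % x for x in (h0, h1, h2, h3, h4))
-- ===== Notes on version B (the rewrite author's own statement) =====
-- stated objective: alternative
-- what changed: B fuses the 80-word message-schedule extension into the compression loop, maintaining a 16-word rolling buffer overwritten in place at index i % 16 instead of materialising an 80-element schedule array per block, and streams blocks by offset instead of building a list of chunks.
import Mathlib
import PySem

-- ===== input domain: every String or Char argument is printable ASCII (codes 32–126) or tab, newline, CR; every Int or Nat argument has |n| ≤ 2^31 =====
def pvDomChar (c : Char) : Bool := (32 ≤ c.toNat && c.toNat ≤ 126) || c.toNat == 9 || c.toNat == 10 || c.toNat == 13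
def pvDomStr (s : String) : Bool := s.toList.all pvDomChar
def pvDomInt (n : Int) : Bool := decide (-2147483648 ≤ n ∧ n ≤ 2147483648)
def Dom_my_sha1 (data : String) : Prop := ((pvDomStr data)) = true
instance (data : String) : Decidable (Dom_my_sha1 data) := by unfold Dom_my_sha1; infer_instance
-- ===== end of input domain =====

-- B fuses SHA-1's 80-word message schedule into the compression loop via a 16-word
-- rolling buffer updated in place (objective: alternative; same digest, no 80-word array).

-- ===== shared primitive helpers (ports of Python byte/format built-ins used by both programs) =====

-- int.from_bytes(l, 'big') — exact for lists of bytes 0..255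
def pvFrom4 (l : List Int) : Int := l.foldl (fun acc b => acc * 256 + b) 0

-- n.to_bytes(8, 'big') — exact for 0 ≤ n < 2^64 (always the case for the bit length here)
def pvToBytes8 (n : Int) : List Int :=
  [PySem.Int.band (n >>> 56) 255, PySem.Int.band (n >>> 48) 255, PySem.Int.band (n >>> 40) 255,
   PySem.Int.band (n >>> 32) 255, PySem.Int.band (n >>> 24) 255, PySem.Int.band (n >>> 16) 255,
   PySem.Int.band (n >>> 8) 255, PySem.Int.band n 255]

-- '%08x' % n — exact for 0 ≤ n < 2^32 (Nat.toDigits 16 yields lowercase hex digits)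
def pvHex8 (n : Int) : String :=
  let s := Nat.toDigits 16 n.toNat
  String.ofList (List.replicate (8 - s.length) '0' ++ s)

-- ===== PORT A =====

-- rol(n, b)
def pvARol (n : Int) (b : Nat) : Int :=
  PySem.Int.band (PySem.Int.bor (n <<< b) (n >>> (32 - b))) 0xffffffff

-- for i in range(16, 80): w[i] = rol(w[i-3] ^ w[i-8] ^ w[i-14] ^ w[i-16], 1)
-- (w[j] read with getD: every index is in range, so this is exact)
def pvAExtend (w : List Int) (i : Nat) : List Int :=
  if i < 80 then
    pvAExtend
      (w.set i (pvARol (PySem.Int.bxor (PySem.Int.bxor (PySem.Int.bxor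
        (w.getD (i - 3) 0) (w.getD (i - 8) 0)) (w.getD (i - 14) 0)) (w.getD (i - 16) 0)) 1))
      (i + 1)
  else w
  termination_by 80 - i

-- the if/elif chain choosing f and k (the last elif's guard 60 <= i < 80 always holds there)
def pvAFK (i : Nat) (b c d : Int) : Int × Int :=
  if i < 20 then (PySem.Int.bxor d (PySem.Int.band b (PySem.Int.bxor c d)), 0x5A827999)
  else if i < 40 then (PySem.Int.bxor (PySem.Int.bxor b c) d, 0x6ED9EBA1)
  else if i < 60 then (PySem.Int.bor (PySem.Int.band b c) (PySem.Int.band d (PySem.Int.bor b c)), 0x8F1BBCDC)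
  else (PySem.Int.bxor (PySem.Int.bxor b c) d, 0xCA62C1D6)

-- for i in range(80): ... a, b, c, d, e update
def pvACompress (w : List Int) (a b c d e : Int) (i : Nat) : Int × Int × Int × Int × Int :=
  if i < 80 then
    let fk := pvAFK i b c d
    let temp := PySem.Int.band (pvARol a 5 + fk.1 + e + fk.2 + w.getD i 0) 0xffffffff
    pvACompress w temp a (pvARol b 30) c d (i + 1)
  else (a, b, c, d, e)
  termination_by 80 - i

-- the body of 'for chunk in chunks(data, 64)'
def pvAChunk (chunk : List Int) (h0 h1 h2 h3 h4 : Int) : Int × Int × Int × Int × Int :=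
  let ws := (PySem.List.pyRange 0 64 4).map
    (fun i => pvFrom4 (PySem.List.slice chunk (some i) (some (i + 4))))
  -- w = [0]*80; w[0:16] = ws
  let w := pvAExtend (ws ++ List.replicate 64 0) 16
  let r := pvACompress w h0 h1 h2 h3 h4 0
  (PySem.Int.band (h0 + r.1) 0xffffffff, PySem.Int.band (h1 + r.2.1) 0xffffffff,
   PySem.Int.band (h2 + r.2.2.1) 0xffffffff, PySem.Int.band (h3 + r.2.2.2.1) 0xffffffff,
   PySem.Int.band (h4 + r.2.2.2.2) 0xffffffff)

def my_sha1 (data : String) : String :=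
  -- data.encode('utf-8'): exact on the ASCII domain Dom_my_sha1
  let bytes : List Int := data.toList.map (fun c => (c.toNat : Int))
  let original_bit_len : Int := (bytes.length : Int) * 8
  let padded := bytes ++ 0x80 ::
    List.replicate (PySem.Int.mod (56 - PySem.Int.mod ((bytes.length : Int) + 1) 64) 64).toNat 0
  let msg := padded ++ pvToBytes8 original_bit_len
  -- chunks(msg, 64)
  let cs := (PySem.List.pyRange 0 (PySem.List.len msg) 64).map
    (fun i => PySem.List.slice msg (some i) (some (i + 64)))
  let r := cs.foldl
    (fun st chunk => pvAChunk chunk st.1 st.2.1 st.2.2.1 st.2.2.2.1 st.2.2.2.2)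
    ((0x67452301 : Int), (0xEFCDAB89 : Int), (0x98BADCFE : Int), (0x10325476 : Int), (0xC3D2E1F0 : Int))
  pvHex8 r.1 ++ pvHex8 r.2.1 ++ pvHex8 r.2.2.1 ++ pvHex8 r.2.2.2.1 ++ pvHex8 r.2.2.2.2

-- ===== PORT B =====

def pvBRol (n : Int) (b : Nat) : Int :=
  PySem.Int.band (PySem.Int.bor (n <<< b) (n >>> (32 - b))) 0xffffffff

def pvBFK (i : Nat) (b c d : Int) : Int × Int :=
  if i < 20 then (PySem.Int.bxor d (PySem.Int.band b (PySem.Int.bxor c d)), 0x5A827999)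
  else if i < 40 then (PySem.Int.bxor (PySem.Int.bxor b c) d, 0x6ED9EBA1)
  else if i < 60 then (PySem.Int.bor (PySem.Int.band b c) (PySem.Int.band d (PySem.Int.bor b c)), 0x8F1BBCDC)
  else (PySem.Int.bxor (PySem.Int.bxor b c) d, 0xCA62C1D6)

-- fused loop: for i in range(80), extending the 16-word rolling buffer in place when i >= 16
def pvBLoop (w : List Int) (a b c d e : Int) (i : Nat) : Int × Int × Int × Int × Int :=
  if i < 80 then
    let w' := if 16 ≤ i then
        w.set (i % 16) (pvBRol (PySem.Int.bxor (PySem.Int.bxor (PySem.Int.bxor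
          (w.getD ((i - 3) % 16) 0) (w.getD ((i - 8) % 16) 0)) (w.getD ((i - 14) % 16) 0))
          (w.getD ((i - 16) % 16) 0)) 1)
      else w
    let wi := w'.getD (i % 16) 0
    let fk := pvBFK i b c d
    pvBLoop w' (PySem.Int.band (pvBRol a 5 + fk.1 + e + fk.2 + wi) 0xffffffff) a (pvBRol b 30) c d (i + 1)
  else (a, b, c, d, e)
  termination_by 80 - i

-- one 64-byte block at offset off: load sixteen big-endian words, run the fused loop, add into h
def pvBBlockStep (msg : List Int) (off : Nat) (h0 h1 h2 h3 h4 : Int) : Int × Int × Int × Int × Int :=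
  let ws := (PySem.List.pyRange 0 16 1).map (fun j => pvFrom4
    (PySem.List.slice msg (some ((off : Int) + 4 * j)) (some ((off : Int) + 4 * j + 4))))
  let r := pvBLoop ws h0 h1 h2 h3 h4 0
  (PySem.Int.band (h0 + r.1) 0xffffffff, PySem.Int.band (h1 + r.2.1) 0xffffffff,
   PySem.Int.band (h2 + r.2.2.1) 0xffffffff, PySem.Int.band (h3 + r.2.2.2.1) 0xffffffff,
   PySem.Int.band (h4 + r.2.2.2.2) 0xffffffff)

-- for off in range(0, len(msg), 64), written as the offset recursion
def pvBBlocks (msg : List Int) (off : Nat) (h0 h1 h2 h3 h4 : Int) : Int × Int × Int × Int × Int :=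
  if off < msg.length then
    let r := pvBBlockStep msg off h0 h1 h2 h3 h4
    pvBBlocks msg (off + 64) r.1 r.2.1 r.2.2.1 r.2.2.2.1 r.2.2.2.2
  else (h0, h1, h2, h3, h4)
  termination_by msg.length - off
  decreasing_by omega

def my_sha1_alt (data : String) : String :=
  -- data.encode('utf-8'): exact on the ASCII domain Dom_my_sha1
  let bytes : List Int := data.toList.map (fun c => (c.toNat : Int))
  let bit_len : Int := (bytes.length : Int) * 8
  let msg := bytes ++ 0x80 ::
    (List.replicate (PySem.Int.mod (-((bytes.length : Int) + 9)) 64).toNat 0 ++ pvToBytes8 bit_len)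
  let r := pvBBlocks msg 0 0x67452301 0xEFCDAB89 0x98BADCFE 0x10325476 0xC3D2E1F0
  String.join ([r.1, r.2.1, r.2.2.1, r.2.2.2.1, r.2.2.2.2].map pvHex8)

-- ===== PRECONDITION & SPEC =====
def Spec_my_sha1 (data : String) (out : String) : Prop := out = my_sha1_alt data
instance (data : String) (out : String) : Decidable (Spec_my_sha1 data out) := by unfold Spec_my_sha1; infer_instance

-- ===== CLAIM (what is proved, stated in full; the proofs are below) =====
def Claim_equal_my_sha1 : Prop := ∀ (data : String), Dom_my_sha1 data → Spec_my_sha1 data (my_sha1 data)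

-- ===== LEMMAS AND PROOFS =====

-- The abstract SHA-1 message schedule over the sixteen loaded words ws
def pvSpecW (ws : List Int) (n : Nat) : Int :=
  if n < 16 then ws.getD n 0
  else pvARol (PySem.Int.bxor (PySem.Int.bxor (PySem.Int.bxor
    (pvSpecW ws (n - 3)) (pvSpecW ws (n - 8))) (pvSpecW ws (n - 14))) (pvSpecW ws (n - 16))) 1
  termination_by n
  decreasing_by all_goals omega

-- which schedule word B's rolling buffer holds at slot j before iteration k
def pvIdx (k j : Nat) : Nat := if k ≤ 16 then j else k - 1 - (k - 1 - j) % 16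

theorem pvBRol_eq_pvARol : pvBRol = pvARol := rfl
theorem pvBFK_eq_pvAFK : pvBFK = pvAFK := rfl

theorem pvIdx_le16 (k j : Nat) (h : k ≤ 16) : pvIdx k j = j := by
  unfold pvIdx; split_ifs <;> omega

theorem pvIdx_succ_frozen (i j : Nat) (h : i < 16) : pvIdx (i + 1) j = pvIdx i j := by
  unfold pvIdx; split_ifs <;> omega

theorem pvIdx_read (i m : Nat) (hi : 16 ≤ i) (hm1 : 1 ≤ m) (hm : m ≤ 16) :
    pvIdx i ((i - m) % 16) = i - m := by
  unfold pvIdx; split_ifs <;> omega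

theorem pvIdx_succ_write (i : Nat) (h : 16 ≤ i) : pvIdx (i + 1) (i % 16) = i := by
  unfold pvIdx; split_ifs <;> omega

theorem pvIdx_succ_other (i j : Nat) (h : 16 ≤ i) (hj : j < 16) (hne : j ≠ i % 16) :
    pvIdx (i + 1) j = pvIdx i j := by
  unfold pvIdx; split_ifs <;> omega

theorem pvGetD_set_self (l : List Int) (i : Nat) (v : Int) (h : i < l.length) :
    (l.set i v).getD i 0 = v := by
  simp [List.getD_eq_getElem?_getD, List.getElem?_set, h]

theorem pvGetD_set_ne (l : List Int) (i j : Nat) (v : Int) (h : i ≠ j) :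
    (l.set i v).getD j 0 = l.getD j 0 := by
  simp [List.getD_eq_getElem?_getD, List.getElem?_set, h]

theorem pvAExtend_spec (fuel : Nat) : ∀ (ws w : List Int) (i : Nat), 80 - i ≤ fuel → 16 ≤ i →
    w.length = 80 → (∀ j, j < i → w.getD j 0 = pvSpecW ws j) →
    (pvAExtend w i).length = 80 ∧ ∀ j, j < 80 → (pvAExtend w i).getD j 0 = pvSpecW ws j := by
  induction fuel with
  | zero =>
    intro ws w i hf h16 hlen hw
    rw [pvAExtend, if_neg (by omega : ¬ i < 80)]
    exact ⟨hlen, fun j hj => hw j (by omega)⟩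
  | succ n ih =>
    intro ws w i hf h16 hlen hw
    by_cases hi : i < 80
    · rw [pvAExtend, if_pos hi]
      set v := pvARol (PySem.Int.bxor (PySem.Int.bxor (PySem.Int.bxor
        (w.getD (i - 3) 0) (w.getD (i - 8) 0)) (w.getD (i - 14) 0)) (w.getD (i - 16) 0)) 1 with hv
      have hvspec : v = pvSpecW ws i := by
        rw [hv, hw (i-3) (by omega), hw (i-8) (by omega), hw (i-14) (by omega), hw (i-16) (by omega)]
        conv_rhs => rw [pvSpecW]
        rw [if_neg (by omega)]
      apply ih ws _ (i+1) (by omega) (by omega) (by simpa using hlen)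
      intro j hj
      by_cases hji : j = i
      · subst hji; rw [pvGetD_set_self _ _ _ (by omega), hvspec]
      · rw [pvGetD_set_ne _ _ _ _ (by omega)]; exact hw j (by omega)
    · rw [pvAExtend, if_neg hi]
      exact ⟨hlen, fun j hj => hw j (by omega)⟩

theorem pvCompress_eq (fuel : Nat) : ∀ (ws W buf : List Int) (i : Nat) (a b c d e : Int),
    80 - i ≤ fuel → buf.length = 16 →
    (∀ j, j < 80 → W.getD j 0 = pvSpecW ws j) →
    (∀ j, j < 16 → buf.getD j 0 = pvSpecW ws (pvIdx i j)) →
    pvACompress W a b c d e i = pvBLoop buf a b c d e i := by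
  induction fuel with
  | zero =>
    intro ws W buf i a b c d e hf hlen hW hbuf
    rw [pvACompress, pvBLoop, if_neg (by omega : ¬ i < 80), if_neg (by omega : ¬ i < 80)]
  | succ n ih =>
    intro ws W buf i a b c d e hf hlen hW hbuf
    by_cases hi : i < 80
    · rw [pvACompress, pvBLoop, if_pos hi, if_pos hi]
      simp only [pvBFK_eq_pvAFK, pvBRol_eq_pvARol]
      by_cases h16 : 16 ≤ i
      · rw [if_pos h16]
        have hm : ∀ m, 1 ≤ m → m ≤ 16 → buf.getD ((i - m) % 16) 0 = pvSpecW ws (i - m) := by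
          intro m hm1 hm2
          rw [hbuf _ (Nat.mod_lt _ (by omega)), pvIdx_read i m h16 hm1 hm2]
        have hvspec : pvARol (PySem.Int.bxor (PySem.Int.bxor (PySem.Int.bxor
            (buf.getD ((i - 3) % 16) 0) (buf.getD ((i - 8) % 16) 0)) (buf.getD ((i - 14) % 16) 0))
            (buf.getD ((i - 16) % 16) 0)) 1 = pvSpecW ws i := by
          rw [hm 3 (by omega) (by omega), hm 8 (by omega) (by omega),
            hm 14 (by omega) (by omega), hm 16 (by omega) (by omega)]
          conv_rhs => rw [pvSpecW]
          rw [if_neg (by omega)]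
        rw [hvspec, pvGetD_set_self _ _ _ (by omega), hW i hi]
        apply ih ws W _ (i+1) _ _ _ _ _ (by omega) (by simpa using hlen) hW
        intro j hj
        by_cases hji : j = i % 16
        · subst hji
          rw [pvGetD_set_self _ _ _ (by omega), pvIdx_succ_write i h16]
        · rw [pvGetD_set_ne _ _ _ _ (fun h => hji h.symm), pvIdx_succ_other i j h16 hj hji]
          exact hbuf j hj
      · rw [if_neg h16]
        have hwi : buf.getD (i % 16) 0 = pvSpecW ws i := by
          rw [Nat.mod_eq_of_lt (by omega), hbuf i (by omega), pvIdx_le16 i i (by omega)]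
        rw [hwi, hW i hi]
        apply ih ws W buf (i+1) _ _ _ _ _ (by omega) hlen hW
        intro j hj
        rw [pvIdx_succ_frozen i j (by omega)]
        exact hbuf j hj
    · rw [pvACompress, pvBLoop, if_neg hi, if_neg hi]

theorem pvSliceChunk (msg : List Int) (off : Nat) (k : Int) (h0 : 0 ≤ k) (hk : k ≤ 60) :
    PySem.List.slice (PySem.List.slice msg (some (off : Int)) (some ((off : Int) + 64)))
      (some k) (some (k + 4))
    = PySem.List.slice msg (some ((off : Int) + k)) (some ((off : Int) + k + 4)) := by
  rw [PySem.List.slice_toNat _ (by omega) (by omega), PySem.List.slice_toNat _ (by omega) (by omega),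
      PySem.List.slice_toNat _ (by omega) (by omega)]
  rw [List.drop_take, List.take_take, List.drop_drop]
  have e1 : ((off : Int) + 64).toNat - ((off:Int)).toNat = 64 := by omega
  have e2 : (k + 4).toNat - k.toNat = 4 := by omega
  have e3 : ((off:Int) + k + 4).toNat - ((off:Int) + k).toNat = 4 := by omega
  have e4 : ((off:Int)).toNat + k.toNat = ((off:Int) + k).toNat := by omega
  rw [e1, e2, e3, e4]
  have e5 : min 4 (64 - k.toNat) = 4 := by omega
  rw [e5]

theorem pvLoad_eq (msg : List Int) (off : Nat) :
    (PySem.List.pyRange 0 64 4).map (fun i => pvFrom4 (PySem.List.slice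
        (PySem.List.slice msg (some (off : Int)) (some ((off : Int) + 64))) (some i) (some (i + 4))))
    = (PySem.List.pyRange 0 16 1).map (fun j => pvFrom4
        (PySem.List.slice msg (some ((off : Int) + 4 * j)) (some ((off : Int) + 4 * j + 4)))) := by
  rw [PySem.List.pyRange_of_pos 0 64 (by norm_num), PySem.List.pyRange_one 0 16]
  norm_num
  intro a ha
  rw [pvSliceChunk msg off (4 * (a:Int)) (by positivity) (by omega)]

theorem pvChunk_eq (msg : List Int) (off : Nat) (h0 h1 h2 h3 h4 : Int) :
    pvAChunk (PySem.List.slice msg (some (off : Int)) (some ((off : Int) + 64))) h0 h1 h2 h3 h4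
    = pvBBlockStep msg off h0 h1 h2 h3 h4 := by
  simp only [pvAChunk, pvBBlockStep, pvLoad_eq msg off]
  set ws := (PySem.List.pyRange 0 16 1).map (fun j => pvFrom4
    (PySem.List.slice msg (some ((off : Int) + 4 * j)) (some ((off : Int) + 4 * j + 4)))) with hws
  have hlen : ws.length = 16 := by
    rw [hws, List.length_map, PySem.List.length_pyRange_one]; decide
  have hext := pvAExtend_spec 64 ws (ws ++ List.replicate 64 0) 16 (by omega) (by omega)
    (by simp [hlen]) (by
      intro j hj
      rw [List.getD_append _ _ _ _ (by omega)]
      conv_rhs => rw [pvSpecW]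
      rw [if_pos hj])
  have hcomp := pvCompress_eq 80 ws (pvAExtend (ws ++ List.replicate 64 0) 16) ws 0
    h0 h1 h2 h3 h4 (by omega) hlen hext.2 (by
      intro j hj
      rw [pvIdx_le16 _ _ (by omega)]
      conv_rhs => rw [pvSpecW]
      rw [if_pos hj])
  rw [hcomp]

theorem pvRange64_nil (a b : Int) (h : b ≤ a) : PySem.List.pyRange a b 64 = [] := by
  rw [PySem.List.pyRange_of_pos a b (by norm_num), if_neg (by omega)]
  simp

theorem pvRange64_cons (a b : Int) (h : a < b) :
    PySem.List.pyRange a b 64 = a :: PySem.List.pyRange (a + 64) b 64 := by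
  rw [PySem.List.pyRange_of_pos a b (by norm_num), PySem.List.pyRange_of_pos (a+64) b (by norm_num),
      if_pos h]
  obtain ⟨m, hm⟩ : ∃ m, ((b - a + 64 - 1) / 64).toNat = m + 1 := by
    have h1 : (1:Int) ≤ (b - a + 64 - 1) / 64 := by omega
    exact ⟨((b - a + 64 - 1) / 64).toNat - 1, by omega⟩
  rw [hm, List.range_succ_eq_map, List.map_cons, List.map_map]
  congr 1
  · ring_nf
  split_ifs with h2
  · have : ((b - (a + 64) + 64 - 1) / 64).toNat = m := by omega
    rw [this]
    apply List.map_congr_left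
    intro k _
    simp [Function.comp]
    ring
  · have : m = 0 := by omega
    simp [this]

theorem pvBlocks_eq (fuel : Nat) : ∀ (msg : List Int) (off : Nat) (h0 h1 h2 h3 h4 : Int),
    msg.length - off ≤ 64 * fuel →
    ((PySem.List.pyRange (off : Int) (PySem.List.len msg) 64).map
        (fun i => PySem.List.slice msg (some i) (some (i + 64)))).foldl
      (fun st chunk => pvAChunk chunk st.1 st.2.1 st.2.2.1 st.2.2.2.1 st.2.2.2.2)
      (h0, h1, h2, h3, h4)
    = pvBBlocks msg off h0 h1 h2 h3 h4 := by
  induction fuel with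
  | zero =>
    intro msg off h0 h1 h2 h3 h4 hf
    simp only [PySem.List.len_eq]
    rw [pvRange64_nil _ _ (by omega), pvBBlocks, if_neg (by omega)]
    rfl
  | succ n ih =>
    intro msg off h0 h1 h2 h3 h4 hf
    by_cases hoff : off < msg.length
    · simp only [PySem.List.len_eq]
      rw [pvRange64_cons _ _ (by exact_mod_cast hoff), List.map_cons, List.foldl_cons,
          pvChunk_eq msg off]
      conv_rhs => rw [pvBBlocks]
      simp only [if_pos hoff]
      have hcast : ((off + 64 : Nat) : Int) = (off : Int) + 64 := by push_cast; ring
      have := ih msg (off + 64) (pvBBlockStep msg off h0 h1 h2 h3 h4).1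
        (pvBBlockStep msg off h0 h1 h2 h3 h4).2.1 (pvBBlockStep msg off h0 h1 h2 h3 h4).2.2.1
        (pvBBlockStep msg off h0 h1 h2 h3 h4).2.2.2.1 (pvBBlockStep msg off h0 h1 h2 h3 h4).2.2.2.2
        (by omega)
      simp only [PySem.List.len_eq, hcast] at this
      exact this
    · simp only [PySem.List.len_eq]
      rw [pvRange64_nil _ _ (by omega), pvBBlocks, if_neg (by omega)]
      rfl

theorem pvJoin5 (a b c d e : String) : String.join [a, b, c, d, e] = a ++ b ++ c ++ d ++ e := by
  simp [String.join]

-- ===== VERDICT (by name: the statement is the Claim_ definition above) =====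
theorem my_sha1_spec : Claim_equal_my_sha1 := by
  intro data _
  unfold Spec_my_sha1
  simp only [my_sha1, my_sha1_alt]
  set bytes := data.toList.map (fun c => (c.toNat : Int)) with hbytes
  have hcnt : (PySem.Int.mod (56 - PySem.Int.mod ((bytes.length : Int) + 1) 64) 64).toNat
      = (PySem.Int.mod (-((bytes.length : Int) + 9)) 64).toNat := by
    rw [PySem.Int.mod_eq_emod_of_pos (by norm_num), PySem.Int.mod_eq_emod_of_pos (by norm_num),
        PySem.Int.mod_eq_emod_of_pos (by norm_num)]
    omega
  rw [hcnt]
  set msg := bytes ++ (0x80 : Int) ::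
    (List.replicate (PySem.Int.mod (-((bytes.length : Int) + 9)) 64).toNat 0
      ++ pvToBytes8 ((bytes.length : Int) * 8)) with hmsg
  have hassoc : bytes ++ (0x80 : Int) ::
      List.replicate (PySem.Int.mod (-((bytes.length : Int) + 9)) 64).toNat 0
      ++ pvToBytes8 ((bytes.length : Int) * 8) = msg := by
    rw [hmsg]; simp
  rw [hassoc]
  have hblocks := pvBlocks_eq msg.length msg 0 0x67452301 0xEFCDAB89 0x98BADCFE 0x10325476 0xC3D2E1F0
    (by omega)
  rw [show ((0 : Nat) : Int) = 0 from rfl] at hblocks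
  rw [hblocks]
  simp only [List.map_cons, List.map_nil]
  rw [pvJoin5]
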